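-- pv_equiv track=rewrite | github.com/ThalesGroup/dhemeter | cli/Docker/app/request_nwp.py | get_timesteps
-- ===== SOURCE A (Python) =====
-- def get_timesteps(common_hours):
--     dict_timesteps = {1, 3, 6}
--     # get maximum value of the common hours
--     max = 0
--     for hour in common_hours:
--         if hour > max:
--             max = hour
--
--     hourly = []
--     # for hourly forecast : add all the hours while it can be added 1 by 1
--     for hour in range(0, max+1):
--         if hour in common_hours:
--             hourly.append(hour)
--         else:
--             break
--
--     three_hourly = []
--     # for three hourly forecast : add all the hours while it can be added 3 by 3
--     for hour in range(0, max+1, 3):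
--         if hour in common_hours:
--             three_hourly.append(hour)
--         else:
--             break
--
--     six_hourly = []
--     # for six hourly forecast : add all the hours while it can be added 6 by 6
--     for hour in range(0, max+1, 6):
--         if hour in common_hours:
--             six_hourly.append(hour)
--         else:
--             break
--
--     return hourly, three_hourly, six_hourly
-- ===== SOURCE B (Python) =====
-- def get_timesteps(common_hours):
--     # Sort the distinct nonnegative multiples of each step, then keep the
--     # prefix in which the i-th sorted value equals i*step (no gap yet).
--     def prefix(step):
--         vals = sorted({h for h in common_hours if h >= 0 and h % step == 0})
--         out = []
--         for i, v in enumerate(vals):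
--             if v != i * step:
--                 break
--             out.append(v)
--         return out
--     return prefix(1), prefix(3), prefix(6)
-- ===== Notes on version B (the rewrite author's own statement) =====
-- stated objective: alternative
-- what changed: A scans for the max then does three bounded range-with-break membership walks; B never tests membership of successive hours at all: for each step it builds the sorted distinct set of nonnegative multiples of that step and keeps the prefix where the i-th sorted value equals i*step, which is exactly the gap-free prefix.
import Mathlib
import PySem

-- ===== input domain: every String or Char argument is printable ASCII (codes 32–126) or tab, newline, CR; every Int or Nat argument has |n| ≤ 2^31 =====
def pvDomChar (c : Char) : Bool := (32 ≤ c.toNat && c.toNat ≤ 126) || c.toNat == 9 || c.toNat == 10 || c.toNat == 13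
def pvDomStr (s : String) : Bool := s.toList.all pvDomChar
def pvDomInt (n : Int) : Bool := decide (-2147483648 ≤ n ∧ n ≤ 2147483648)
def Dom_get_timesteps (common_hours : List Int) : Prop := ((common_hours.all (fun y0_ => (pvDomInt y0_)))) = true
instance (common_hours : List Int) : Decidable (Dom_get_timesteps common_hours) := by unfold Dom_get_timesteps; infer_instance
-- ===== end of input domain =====

-- B drops A's max pass and membership walks entirely: it sorts the distinct nonnegative
-- multiples of each step and keeps the prefix where sorted[i] = i*step (objective: alternative).

-- ===== PORT A =====
-- 'for hour in range(0, max+1, s): if hour in common_hours: append else break' —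
-- ported as a bounded counter recursion carrying the break
def pvScanRange (l : List Int) (stop s : Int) (hs : 0 < s) (h : Int) : List Int :=
  if hlt : h < stop then
    (if h ∈ l then h :: pvScanRange l stop s hs (h + s) else [])
  else []
termination_by (stop - h).toNat
decreasing_by omega

def get_timesteps (common_hours : List Int) : List Int × List Int × List Int :=
  let mx := common_hours.foldl (fun m h => if h > m then h else m) 0
  (pvScanRange common_hours (mx + 1) 1 one_pos 0,
   pvScanRange common_hours (mx + 1) 3 (by norm_num) 0,
   pvScanRange common_hours (mx + 1) 6 (by norm_num) 0)

-- ===== PORT B =====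
-- 'for i, v in enumerate(vals): if v != i*step: break; out.append(v)'
def pvPrefixScan (s : Int) (i : Int) : List Int → List Int
  | [] => []
  | v :: rest => if v ≠ i * s then [] else v :: pvPrefixScan s (i + 1) rest

-- 'sorted({h for h in common_hours if h >= 0 and h % step == 0})'
def pvPrefix (l : List Int) (s : Int) : List Int :=
  let vals := PySem.List.sorted
    (PySem.Set.ofList (l.filter (fun h => decide (0 ≤ h) && decide (PySem.Int.mod h s = 0))))
    (fun x => x) false
  pvPrefixScan s 0 vals

def get_timesteps_alt (common_hours : List Int) : List Int × List Int × List Int :=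
  (pvPrefix common_hours 1, pvPrefix common_hours 3, pvPrefix common_hours 6)

-- ===== PRECONDITION & SPEC =====
def Spec_get_timesteps (common_hours : List Int) (out : List Int × List Int × List Int) : Prop := out = get_timesteps_alt common_hours
instance (common_hours : List Int) (out : List Int × List Int × List Int) : Decidable (Spec_get_timesteps common_hours out) := by unfold Spec_get_timesteps; infer_instance

-- ===== CLAIM (what is proved, stated in full; the proofs are below) =====
def Claim_equal_get_timesteps : Prop := ∀ (common_hours : List Int), Dom_get_timesteps common_hours → Spec_get_timesteps common_hours (get_timesteps common_hours)

-- ===== LEMMAS AND PROOFS =====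

-- proof-only intermediate: the unbounded walk 'while h in l: append; h += s'
def pvWalk (l : List Int) (s : Int) (hs : 0 < s) (h : Int) : List Int :=
  if hmem : h ∈ l then h :: pvWalk l s hs (h + s) else []
termination_by (l.foldl max 0 + s - h).toNat
decreasing_by
  have := (PySem.List.le_foldl_max l 0).2 h hmem
  omega

-- A's bounded scan equals the walk once the bound covers every member of l
theorem pv_scan_eq_walk (l : List Int) (s : Int) (hs : 0 < s) (m : Int) (hm : ∀ x ∈ l, x ≤ m) :
    ∀ (n : Nat) (h : Int), (m + 1 - h).toNat ≤ n →
      pvScanRange l (m + 1) s hs h = pvWalk l s hs h := by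
  intro n
  induction n with
  | zero =>
      intro h hn
      rw [pvScanRange, pvWalk]
      have hnot : h ∉ l := fun hmem => by have := hm h hmem; omega
      simp [hnot]
  | succ n ih =>
      intro h hn
      rw [pvScanRange, pvWalk]
      by_cases hlt : h < m + 1
      · rw [dif_pos hlt]
        by_cases hmem : h ∈ l
        · rw [if_pos hmem, dif_pos hmem]
          congr 1
          exact ih (h + s) (by omega)
        · rw [if_neg hmem, dif_neg hmem]
      · have hnot : h ∉ l := fun hmem => by have := hm h hmem; omega
        simp [hnot, hlt]

-- the walk from i*s equals B's indexed scan over any strictly increasing list that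
-- enumerates exactly the members of l that are nonnegative multiples of s and ≥ i*s
theorem pv_walk_eq_prefixScan (l : List Int) (s : Int) (hs : 0 < s) :
    ∀ (vs : List Int) (i : Int), 0 ≤ i → vs.Pairwise (· < ·) →
      (∀ v, v ∈ vs ↔ (v ∈ l ∧ 0 ≤ v ∧ s ∣ v ∧ i * s ≤ v)) →
      pvWalk l s hs (i * s) = pvPrefixScan s i vs := by
  intro vs
  induction vs with
  | nil =>
      intro i hi _ hmem
      rw [pvWalk, pvPrefixScan]
      have hnot : i * s ∉ l := fun hin => by
        have : i * s ∈ ([] : List Int) := (hmem (i * s)).2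
          ⟨hin, mul_nonneg hi hs.le, ⟨i, mul_comm i s⟩, le_rfl⟩
        simp at this
      simp [hnot]
  | cons v rest ih =>
      intro i hi hpw hmem
      have hpw_rest := hpw.sublist (List.sublist_cons_self v rest)
      have hlt : ∀ x ∈ rest, v < x := (List.pairwise_cons.mp hpw).1
      rw [pvWalk, pvPrefixScan]
      by_cases hv : v = i * s
      · subst hv
        have hin : i * s ∈ l := ((hmem _).1 (List.mem_cons_self)).1
        rw [dif_pos hin, if_neg (by simp)]
        congr 1
        have hstep : i * s + s = (i + 1) * s := by ring
        rw [hstep]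
        refine ih (i + 1) (by omega) hpw_rest ?_
        intro x
        constructor
        · intro hx
          obtain ⟨hxl, hx0, ⟨q, hq⟩, _⟩ := (hmem x).1 (List.mem_cons_of_mem _ hx)
          have hvx : i * s < x := hlt x hx
          refine ⟨hxl, hx0, ⟨q, hq⟩, ?_⟩
          have hiq : i < q := by
            by_contra hle
            push_neg at hle
            have : s * q ≤ s * i := mul_le_mul_of_nonneg_left hle hs.le
            nlinarith
          nlinarith
        · rintro ⟨hxl, hx0, hdvd, hge⟩
          have hgt : i * s < x := by nlinarith
          have hx : x ∈ i * s :: rest := (hmem x).2 ⟨hxl, hx0, hdvd, hgt.le⟩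
          rcases List.mem_cons.mp hx with heq | hx'
          · exact absurd heq (by intro h; rw [h] at hgt; exact lt_irrefl _ hgt)
          · exact hx'
      · rw [if_pos hv]
        have hnot : i * s ∉ l := by
          intro hin
          have hx : i * s ∈ v :: rest := (hmem (i * s)).2
            ⟨hin, mul_nonneg hi hs.le, ⟨i, mul_comm i s⟩, le_rfl⟩
          have hvge : i * s ≤ v := ((hmem v).1 (List.mem_cons_self)).2.2.2
          rcases List.mem_cons.mp hx with heq | hx'
          · exact hv heq.symm
          · have := hlt _ hx'; omega
        rw [dif_neg hnot]

-- B's pvPrefix equals the walk from 0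
theorem pv_prefix_eq_walk (l : List Int) (s : Int) (hs : 0 < s) :
    pvPrefix l s = pvWalk l s hs 0 := by
  show pvPrefixScan s 0 (PySem.List.sorted
      (PySem.Set.ofList (l.filter (fun h => decide (0 ≤ h) && decide (PySem.Int.mod h s = 0))))
      (fun x => x) false) = pvWalk l s hs 0
  have key := pv_walk_eq_prefixScan l s hs (PySem.List.sorted
      (PySem.Set.ofList (l.filter (fun h => decide (0 ≤ h) && decide (PySem.Int.mod h s = 0))))
      (fun x => x) false) 0 le_rfl (PySem.List.sorted_ofList_pairwise_lt _) ?_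
  · rw [zero_mul] at key
    exact key.symm
  intro v
  rw [PySem.List.mem_sorted, PySem.Set.mem_ofList, List.mem_filter]
  simp only [Bool.and_eq_true, decide_eq_true_eq, zero_mul]
  constructor
  · rintro ⟨hl, h0v, hm⟩
    exact ⟨hl, h0v, (PySem.Int.mod_eq_zero_iff_dvd v s).1 hm, h0v⟩
  · rintro ⟨hl, h0v, hd, _⟩
    exact ⟨hl, h0v, (PySem.Int.mod_eq_zero_iff_dvd v s).2 hd⟩

-- ===== VERDICT (by name: the statement is the Claim_ definition above) =====
theorem get_timesteps_spec : Claim_equal_get_timesteps := by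
  intro l _
  unfold Spec_get_timesteps get_timesteps get_timesteps_alt
  have hmax : (fun (m h : Int) => if h > m then h else m) = max := by
    funext m h
    rw [max_def]
    split_ifs <;> omega
  rw [hmax]
  obtain ⟨h0, hmem⟩ := PySem.List.le_foldl_max l 0
  refine Prod.ext ?_ (Prod.ext ?_ ?_) <;> simp only <;>
    rw [pv_scan_eq_walk l _ (by norm_num) _ hmem _ 0 le_rfl, pv_prefix_eq_walk]
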